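-- pv_equiv track=rewrite | github.com/hsajid-cs/RAG-MCQ-Generator | embed.py | sliding_windows
-- ===== SOURCE A (Python) =====
-- from typing import Iterable, Iterator, List, Sequence
--
-- def sliding_windows(words: Sequence[str], window_size: int, stride: int) -> List[tuple[int, int]]:
-- 	"""Produce (start, end) index pairs using a sliding window over the words list."""
--
-- 	if not words:
-- 		return []
--
-- 	if window_size <= 0:
-- 		raise ValueError("window_size must be positive")
--
-- 	if stride <= 0:
-- 		raise ValueError("stride must be positive")
--
-- 	if len(words) <= window_size:
-- 		return [(0, len(words))]
--
-- 	spans: List[tuple[int, int]] = []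
-- 	start = 0
-- 	while start < len(words):
-- 		end = min(start + window_size, len(words))
-- 		spans.append((start, end))
-- 		if end == len(words):
-- 			break
-- 		start += stride
-- 	return spans
-- ===== SOURCE B (Python) =====
-- def sliding_windows(words, window_size, stride):
--     """Produce (start, end) index pairs using a sliding window over the words list."""
--     if not words:
--         return []
--     if window_size <= 0:
--         raise ValueError("window_size must be positive")
--     if stride <= 0:
--         raise ValueError("stride must be positive")
--     n = len(words)
--     if n <= window_size:
--         return [(0, n)]
--     # number of full-length windows before the stop point, by ceiling division
--     m = (n - window_size + stride - 1) // stride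
--     count = m + 1 if m * stride < n else m
--     return [(i * stride, min(i * stride + window_size, n)) for i in range(count)]
-- ===== Notes on version B (the rewrite author's own statement) =====
-- stated objective: alternative
-- what changed: The while-loop that discovers the stop point by testing end==len(words) is replaced by a closed-form ceil-division window count plus a single range comprehension building all spans.
import Mathlib
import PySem

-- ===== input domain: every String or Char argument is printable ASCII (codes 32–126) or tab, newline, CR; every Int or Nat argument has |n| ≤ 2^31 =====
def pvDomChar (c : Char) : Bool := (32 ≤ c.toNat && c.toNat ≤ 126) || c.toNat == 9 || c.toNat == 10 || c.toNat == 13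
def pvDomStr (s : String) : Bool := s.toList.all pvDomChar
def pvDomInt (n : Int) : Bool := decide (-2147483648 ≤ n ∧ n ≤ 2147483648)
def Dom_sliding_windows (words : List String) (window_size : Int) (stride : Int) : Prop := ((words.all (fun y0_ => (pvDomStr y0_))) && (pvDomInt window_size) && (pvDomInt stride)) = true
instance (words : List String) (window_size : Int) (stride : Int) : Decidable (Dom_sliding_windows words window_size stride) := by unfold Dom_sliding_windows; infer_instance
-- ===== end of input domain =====

-- B replaces A's stop-point-testing while loop by a closed-form ceil-division window count
-- plus one range comprehension (objective: alternative decomposition, same cost).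

-- ===== PORT A =====
-- the while loop; fuel = words.length bounds the iteration count (start strictly increases inside [0, len))
def slideLoopA (n ws stride : Int) : Nat → Int → List (Int × Int)
  | 0, _ => []
  | fuel + 1, start =>
    if start < n then
      let e := min (start + ws) n
      if e = n then [(start, e)]
      else (start, e) :: slideLoopA n ws stride fuel (start + stride)
    else []

def sliding_windows (words : List String) (window_size : Int) (stride : Int) : List (Int × Int) :=
  if words = [] then []
  else if window_size ≤ 0 then []      -- Python raises ValueError here; excluded by Pre_
  else if stride ≤ 0 then []           -- Python raises ValueError here; excluded by Pre_
  else if (words.length : Int) ≤ window_size then [(0, (words.length : Int))]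
  else slideLoopA (words.length : Int) window_size stride words.length 0

-- ===== PORT B =====
def sliding_windows_alt (words : List String) (window_size : Int) (stride : Int) : List (Int × Int) :=
  if words = [] then []
  else if window_size ≤ 0 then []      -- Python raises ValueError here; excluded by Pre_
  else if stride ≤ 0 then []           -- Python raises ValueError here; excluded by Pre_
  else
    let n : Int := words.length
    if n ≤ window_size then [(0, n)]
    else
      let m := PySem.Int.floordiv (n - window_size + stride - 1) stride
      let count := if m * stride < n then m + 1 else m
      (PySem.List.pyRange 0 count 1).map
        (fun i => (i * stride, min (i * stride + window_size) n))

-- ===== PRECONDITION & SPEC =====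
-- Pre_ excludes exactly the inputs on which Python A raises ValueError:
-- a non-empty words list together with a non-positive window_size or stride.
def Pre_sliding_windows (words : List String) (window_size : Int) (stride : Int) : Prop :=
  words = [] ∨ (1 ≤ window_size ∧ 1 ≤ stride)
instance (words : List String) (window_size : Int) (stride : Int) : Decidable (Pre_sliding_windows words window_size stride) := by unfold Pre_sliding_windows; infer_instance

def pvWitness_sliding_windows : List String × Int × Int := (["a", "b", "c", "d", "e"], 2, 2)

def Spec_sliding_windows (words : List String) (window_size : Int) (stride : Int) (out : List (Int × Int)) : Prop := out = sliding_windows_alt words window_size stride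
instance (words : List String) (window_size : Int) (stride : Int) (out : List (Int × Int)) : Decidable (Spec_sliding_windows words window_size stride out) := by unfold Spec_sliding_windows; infer_instance

-- ===== CLAIM (what is proved, stated in full; the proofs are below) =====
def Claim_equal_sliding_windows : Prop := ∀ (words : List String) (window_size : Int) (stride : Int), Dom_sliding_windows words window_size stride → Pre_sliding_windows words window_size stride → Spec_sliding_windows words window_size stride (sliding_windows words window_size stride)

-- ===== LEMMAS AND PROOFS =====

-- The loop, started at start = i*stride with i admissible, produces exactly the
-- spans numbered i, i+1, …, c-1 where c is B's closed-form window count.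
theorem slideLoopA_eq (n ws stride m c : Int) (hws : 1 ≤ ws) (hst : 1 ≤ stride)
    (hN : ws < n)
    (hm1 : n - ws ≤ m * stride) (hm2 : (m - 1) * stride < n - ws)
    (hcdef : c = if m * stride < n then m + 1 else m) :
    ∀ (fuel : Nat) (i : Nat),
      c - i ≤ fuel → ((i : Int) < c ∨ ((i : Int) = c ∧ n ≤ m * stride)) →
      slideLoopA n ws stride fuel ((i : Int) * stride)
        = (List.range (c - i).toNat).map
            (fun j => (((i + j : Nat) : Int) * stride,
                       min (((i + j : Nat) : Int) * stride + ws) n)) := by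
  intro fuel
  induction fuel with
  | zero =>
    intro i hle hdisj
    have hm0 : 1 ≤ m := by nlinarith
    -- c - i ≤ 0 forces i = c, hence n ≤ m*stride and the loop condition is false
    have hic : (i : Int) = c := by
      rcases hdisj with h | h
      · exfalso; omega
      · exact h.1
    have hnm : n ≤ m * stride := by
      rcases hdisj with h | h
      · exfalso; omega
      · exact h.2
    have hcm : m ≤ (i : Int) := by rw [hcdef] at hic; split at hic <;> omega
    have : n ≤ (i : Int) * stride := by nlinarith
    simp [slideLoopA]
    omega
  | succ fuel ih =>
    intro i hle hdisj
    have hm0 : 1 ≤ m := by nlinarith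
    by_cases hic : (i : Int) < c
    · -- window i is emitted
      have him : (i : Int) ≤ m := by rw [hcdef] at hic; split at hic <;> omega
      have hlt : (i : Int) * stride < n := by
        by_cases hi' : (i : Int) ≤ m - 1
        · nlinarith
        · -- i = m, and then c = m+1 so m*stride < n
          have hieq : (i : Int) = m := by omega
          rw [hcdef] at hic; split at hic
          · rw [hieq]; assumption
          · omega
      rw [slideLoopA]
      simp only [hlt, if_pos]
      have hrange : (c - (i : Int)).toNat = ((c - ((i : Int) + 1)).toNat) + 1 := by omega
      rw [hrange, List.range_succ_eq_map]
      by_cases hend : min ((i : Int) * stride + ws) n = n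
      · -- break: this is the last window, i + 1 = c
        have hge : n ≤ (i : Int) * stride + ws := by omega
        have hmi : m ≤ (i : Int) := by nlinarith
        have him' : (i : Int) = m := by omega
        have hcm1 : c = m + 1 := by
          rw [hcdef]; split
          · rfl
          · exfalso; omega
        have hzero : (c - ((i : Int) + 1)).toNat = 0 := by omega
        simp [hend, hzero]
      · -- continue: recurse at i + 1
        have hlt2 : (i : Int) * stride + ws < n := by omega
        have him2 : (i : Int) < m := by nlinarith
        have hnext : ((i : Int) + 1) < c ∨ (((i : Int) + 1) = c ∧ n ≤ m * stride) := by
          by_cases h' : (i : Int) + 1 < c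
          · exact Or.inl h'
          · refine Or.inr ⟨by omega, ?_⟩
            have hcm : c = m := by rw [hcdef]; split <;> omega
            rw [hcdef] at hcm; split at hcm <;> omega
        have hrec := ih (i + 1) (by push_cast; omega) (by push_cast; exact hnext)
        have harg : (i : Int) * stride + stride = ((i + 1 : Nat) : Int) * stride := by
          push_cast; ring
        rw [if_neg hend, harg, hrec, List.map_cons, List.map_map]
        push_cast
        refine List.cons_eq_cons.mpr ⟨by norm_num, ?_⟩
        apply List.map_congr_left
        intro j _
        simp only [Function.comp]
        push_cast
        ring_nf
    · -- i = c: the loop condition is false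
      have hic' : (i : Int) = c := by
        rcases hdisj with h | h
        · exact absurd h hic
        · exact h.1
      have hnm : n ≤ m * stride := by
        rcases hdisj with h | h
        · exact absurd h hic
        · exact h.2
      have hcm : m ≤ (i : Int) := by rw [hcdef] at hic'; split at hic' <;> omega
      have hge : n ≤ (i : Int) * stride := by nlinarith
      rw [slideLoopA]
      simp only [if_neg (by omega : ¬ ((i : Int) * stride < n))]
      have : (c - (i : Int)).toNat = 0 := by omega
      simp [this]

-- ===== VERDICT (by name: the statement is the Claim_ definition above) =====
theorem sliding_windows_spec : Claim_equal_sliding_windows := by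
  intro words window_size stride _hdom hpre
  unfold Spec_sliding_windows sliding_windows sliding_windows_alt
  by_cases hnil : words = []
  · simp [hnil]
  · rcases hpre with h | ⟨hws, hst⟩
    · exact absurd h hnil
    simp only [if_neg hnil, if_neg (by omega : ¬ window_size ≤ 0),
      if_neg (by omega : ¬ stride ≤ 0)]
    by_cases hsmall : (words.length : Int) ≤ window_size
    · simp [hsmall]
    · simp only [if_neg hsmall]
      set n : Int := (words.length : Int) with hn
      have hN : window_size < n := by omega
      set m := PySem.Int.floordiv (n - window_size + stride - 1) stride with hm
      -- ceil-division bracket for m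
      have hmediv : m = (n - window_size + stride - 1) / stride := by
        rw [hm, PySem.Int.floordiv_eq_ediv_of_pos (by omega)]
      have hdm := Int.mul_ediv_add_emod (n - window_size + stride - 1) stride
      have hr0 := Int.emod_nonneg (n - window_size + stride - 1) (by omega : stride ≠ 0)
      have hr1 := Int.emod_lt_of_pos (n - window_size + stride - 1) (by omega : 0 < stride)
      rw [← hmediv] at hdm
      have hm1 : n - window_size ≤ m * stride := by nlinarith
      have hm2 : (m - 1) * stride < n - window_size := by nlinarith
      have hm0 : 1 ≤ m := by nlinarith
      set c : Int := if m * stride < n then m + 1 else m with hc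
      -- fuel bound: c ≤ n = words.length
      have hmn : m ≤ n - window_size := by nlinarith
      have hcn : c ≤ n := by rw [hc]; split <;> omega
      have key := slideLoopA_eq n window_size stride m c hws hst hN hm1 hm2 hc
        words.length 0 (by simp; omega)
          (Or.inl (by simp only [Nat.cast_zero]; rw [hc]; split <;> omega))
      simp only [Nat.cast_zero, zero_mul, Int.sub_zero] at key
      rw [key]
      rw [PySem.List.pyRange_one]
      simp only [Int.sub_zero, List.map_map]
      apply List.map_congr_left
      intro j _
      simp only [Function.comp]
      push_cast
      ring_nf
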